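-- pv_equiv track=rewrite | github.com/AvishKaushik/c9-scout-api | category2-scouting-report/app/services/composition_tracker.py | _identify_lol_power_spikes
-- ===== SOURCE A (Python) =====
-- def _identify_lol_power_spikes(champions: list[str]) -> list[str]:
--     """Identify team composition power spikes."""
--     spikes = []
--
--     early_game = ["Renekton", "Lee Sin", "Elise", "Draven", "Lucian"]
--     mid_game = ["Corki", "Azir", "Tristana"]
--     late_game = ["Kayle", "Kassadin", "Vayne", "Kog'Maw"]
--
--     if sum(1 for c in champions if c in early_game) >= 2:
--         spikes.append("Strong levels 1-10")
--     if sum(1 for c in champions if c in mid_game) >= 2: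
--         spikes.append("2-item power spike (~20-25 min)")
--     if sum(1 for c in champions if c in late_game) >= 2:
--         spikes.append("Strong 35+ minutes")
--
--     return spikes or ["Moderate scaling throughout game"]
-- ===== SOURCE B (Python) =====
-- _PHASE = {
--     "Renekton": "early", "Lee Sin": "early", "Elise": "early", "Draven": "early", "Lucian": "early",
--     "Corki": "mid", "Azir": "mid", "Tristana": "mid",
--     "Kayle": "late", "Kassadin": "late", "Vayne": "late", "Kog'Maw": "late",
-- }
--
-- def _identify_lol_power_spikes(champions: list[str]) -> list[str]:
--     """Identify team composition power spikes (single pass with phase counters)."""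
--     early = mid = late = 0
--     for c in champions:
--         phase = _PHASE.get(c)
--         if phase == "early":
--             early += 1
--         elif phase == "mid":
--             mid += 1
--         elif phase == "late":
--             late += 1
--     spikes = []
--     if early >= 2:
--         spikes.append("Strong levels 1-10")
--     if mid >= 2:
--         spikes.append("2-item power spike (~20-25 min)")
--     if late >= 2:
--         spikes.append("Strong 35+ minutes")
--     return spikes or ["Moderate scaling throughout game"]
-- ===== Notes on version B (the rewrite author's own statement) =====
-- stated objective: simpler
-- what changed: Replaces three separate membership-scan sums over champions with one dict of champion->phase and a single pass maintaining three counters.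
import Mathlib
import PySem

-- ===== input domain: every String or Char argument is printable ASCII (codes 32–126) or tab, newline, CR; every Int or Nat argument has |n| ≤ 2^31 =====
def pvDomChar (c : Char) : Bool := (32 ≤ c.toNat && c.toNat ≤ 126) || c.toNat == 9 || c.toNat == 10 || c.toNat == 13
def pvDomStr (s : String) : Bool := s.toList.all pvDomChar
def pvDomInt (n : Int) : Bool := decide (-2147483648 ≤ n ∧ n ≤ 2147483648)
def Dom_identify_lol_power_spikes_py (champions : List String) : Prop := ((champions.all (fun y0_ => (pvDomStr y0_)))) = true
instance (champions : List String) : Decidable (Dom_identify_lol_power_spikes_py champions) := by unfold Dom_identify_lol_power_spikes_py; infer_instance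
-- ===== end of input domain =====

-- B replaces A's three membership-scan sums with one champion→phase dict and a single counting pass (simpler).


-- ===== PORT A =====
def identify_lol_power_spikes_py (champions : List String) : List String :=
  let early_game := ["Renekton", "Lee Sin", "Elise", "Draven", "Lucian"]
  let mid_game := ["Corki", "Azir", "Tristana"]
  let late_game := ["Kayle", "Kassadin", "Vayne", "Kog'Maw"]
  let spikes : List String := []
  let spikes := if ((champions.map (fun c => if c ∈ early_game then (1:Int) else 0)).sum ≥ 2)
    then spikes ++ ["Strong levels 1-10"] else spikes
  let spikes := if ((champions.map (fun c => if c ∈ mid_game then (1:Int) else 0)).sum ≥ 2)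
    then spikes ++ ["2-item power spike (~20-25 min)"] else spikes
  let spikes := if ((champions.map (fun c => if c ∈ late_game then (1:Int) else 0)).sum ≥ 2)
    then spikes ++ ["Strong 35+ minutes"] else spikes
  if spikes = [] then ["Moderate scaling throughout game"] else spikes

-- ===== PORT B =====
def pvPhase : PySem.Dict String String := PySem.Dict.mk
  [("Renekton", "early"), ("Lee Sin", "early"), ("Elise", "early"), ("Draven", "early"), ("Lucian", "early"),
   ("Corki", "mid"), ("Azir", "mid"), ("Tristana", "mid"),
   ("Kayle", "late"), ("Kassadin", "late"), ("Vayne", "late"), ("Kog'Maw", "late")]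

def identify_lol_power_spikes_py_alt (champions : List String) : List String :=
  let counts := champions.foldl (fun (acc : Int × Int × Int) c =>
    match pvPhase.get? c with
    | some "early" => (acc.1 + 1, acc.2.1, acc.2.2)
    | some "mid" => (acc.1, acc.2.1 + 1, acc.2.2)
    | some "late" => (acc.1, acc.2.1, acc.2.2 + 1)
    | _ => acc) (0, 0, 0)
  let spikes : List String :=
    (if counts.1 ≥ 2 then ["Strong levels 1-10"] else []) ++
    (if counts.2.1 ≥ 2 then ["2-item power spike (~20-25 min)"] else []) ++
    (if counts.2.2 ≥ 2 then ["Strong 35+ minutes"] else [])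
  if spikes = [] then ["Moderate scaling throughout game"] else spikes

-- ===== PRECONDITION & SPEC =====
def Spec_identify_lol_power_spikes_py (champions : List String) (out : List String) : Prop := out = identify_lol_power_spikes_py_alt champions
instance (champions : List String) (out : List String) : Decidable (Spec_identify_lol_power_spikes_py champions out) := by unfold Spec_identify_lol_power_spikes_py; infer_instance

-- ===== CLAIM (what is proved, stated in full; the proofs are below) =====
def Claim_equal_identify_lol_power_spikes_py : Prop := ∀ (champions : List String), Dom_identify_lol_power_spikes_py champions → Spec_identify_lol_power_spikes_py champions (identify_lol_power_spikes_py champions)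

-- ===== LEMMAS AND PROOFS =====

set_option maxRecDepth 16384 in
-- B's single fold computes exactly A's three 0/1 sums (shifted by the starting state).
lemma pv_fold_counts (champions : List String) (e m l : Int) :
    champions.foldl (fun (acc : Int × Int × Int) c =>
      match pvPhase.get? c with
      | some "early" => (acc.1 + 1, acc.2.1, acc.2.2)
      | some "mid" => (acc.1, acc.2.1 + 1, acc.2.2)
      | some "late" => (acc.1, acc.2.1, acc.2.2 + 1)
      | _ => acc) (e, m, l) =
    (e + (champions.map (fun c => if c ∈ ["Renekton", "Lee Sin", "Elise", "Draven", "Lucian"] then (1:Int) else 0)).sum,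
     m + (champions.map (fun c => if c ∈ ["Corki", "Azir", "Tristana"] then (1:Int) else 0)).sum,
     l + (champions.map (fun c => if c ∈ ["Kayle", "Kassadin", "Vayne", "Kog'Maw"] then (1:Int) else 0)).sum) := by
  induction champions generalizing e m l with
  | nil => simp
  | cons c cs ih =>
    simp only [List.foldl_cons, List.map_cons, List.sum_cons]
    have hstep : (match pvPhase.get? c with
      | some "early" => ((e + 1 : Int), (m : Int), (l : Int))
      | some "mid" => (e, m + 1, l)
      | some "late" => (e, m, l + 1)
      | _ => (e, m, l)) =
      (e + (if c ∈ ["Renekton", "Lee Sin", "Elise", "Draven", "Lucian"] then (1:Int) else 0),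
       m + (if c ∈ ["Corki", "Azir", "Tristana"] then (1:Int) else 0),
       l + (if c ∈ ["Kayle", "Kassadin", "Vayne", "Kog'Maw"] then (1:Int) else 0)) := by
      by_cases h1 : c = "Renekton"
      · subst h1; simp [pvPhase, PySem.Dict.get?]
      by_cases h2 : c = "Lee Sin"
      · subst h2; simp [pvPhase, PySem.Dict.get?]
      by_cases h3 : c = "Elise"
      · subst h3; simp [pvPhase, PySem.Dict.get?]
      by_cases h4 : c = "Draven"
      · subst h4; simp [pvPhase, PySem.Dict.get?]
      by_cases h5 : c = "Lucian"
      · subst h5; simp [pvPhase, PySem.Dict.get?]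
      by_cases h6 : c = "Corki"
      · subst h6; simp [pvPhase, PySem.Dict.get?]
      by_cases h7 : c = "Azir"
      · subst h7; simp [pvPhase, PySem.Dict.get?]
      by_cases h8 : c = "Tristana"
      · subst h8; simp [pvPhase, PySem.Dict.get?]
      by_cases h9 : c = "Kayle"
      · subst h9; simp [pvPhase, PySem.Dict.get?]
      by_cases h10 : c = "Kassadin"
      · subst h10; simp [pvPhase, PySem.Dict.get?]
      by_cases h11 : c = "Vayne"
      · subst h11; simp [pvPhase, PySem.Dict.get?]
      by_cases h12 : c = "Kog'Maw"
      · subst h12; simp [pvPhase, PySem.Dict.get?]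
      simp [pvPhase, PySem.Dict.get?, List.find?, show ("Renekton" == c) = false from beq_eq_false_iff_ne.mpr (Ne.symm h1), show ("Lee Sin" == c) = false from beq_eq_false_iff_ne.mpr (Ne.symm h2), show ("Elise" == c) = false from beq_eq_false_iff_ne.mpr (Ne.symm h3), show ("Draven" == c) = false from beq_eq_false_iff_ne.mpr (Ne.symm h4), show ("Lucian" == c) = false from beq_eq_false_iff_ne.mpr (Ne.symm h5), show ("Corki" == c) = false from beq_eq_false_iff_ne.mpr (Ne.symm h6), show ("Azir" == c) = false from beq_eq_false_iff_ne.mpr (Ne.symm h7), show ("Tristana" == c) = false from beq_eq_false_iff_ne.mpr (Ne.symm h8), show ("Kayle" == c) = false from beq_eq_false_iff_ne.mpr (Ne.symm h9), show ("Kassadin" == c) = false from beq_eq_false_iff_ne.mpr (Ne.symm h10), show ("Vayne" == c) = false from beq_eq_false_iff_ne.mpr (Ne.symm h11), show ("Kog'Maw" == c) = false from beq_eq_false_iff_ne.mpr (Ne.symm h12), h1, h2, h3, h4, h5, h6, h7, h8, h9, h10, h11, h12]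
    rw [hstep, ih]
    simp only [Prod.mk.injEq]
    refine ⟨by ring, by ring, by ring⟩

-- ===== VERDICT (by name: the statement is the Claim_ definition above) =====
theorem identify_lol_power_spikes_py_spec : Claim_equal_identify_lol_power_spikes_py := by
  intro champions _
  unfold Spec_identify_lol_power_spikes_py identify_lol_power_spikes_py identify_lol_power_spikes_py_alt
  rw [pv_fold_counts]
  simp only [zero_add]
  split_ifs <;> simp_all
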